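-- pv_equiv track=rewrite | github.com/nicorobson/School-Grade-Calculator | grade_calculator.py | course_weightage_error
-- ===== SOURCE A (Python) =====
-- def course_weightage_error(weightage):
--     flag1 = True
--     for weight in weightage:
--         if weight.isdigit() == False:
--             flag1 = False
--             break
--     if flag1 == True:
--         sum_weightage = 0
--         for weight in weightage:
--             sum_weightage += int(weight)
--     if (flag1 == False) or (sum_weightage != 100):
--         return True
--     else:
--         return False
-- ===== SOURCE B (Python) =====
-- def course_weightage_error(weightage):
--     total = 0
--     for weight in weightage:
--         if not weight.isdigit():
--             return True
--         total += int(weight)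
--     return total != 100
-- ===== Notes on version B (the rewrite author's own statement) =====
-- stated objective: simpler
-- what changed: Fuses A's two sequential passes (flag-setting digit scan, then a separate summing loop) into one pass that returns True on the first non-digit and otherwise accumulates the sum, dropping the flag entirely.
import Mathlib
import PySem

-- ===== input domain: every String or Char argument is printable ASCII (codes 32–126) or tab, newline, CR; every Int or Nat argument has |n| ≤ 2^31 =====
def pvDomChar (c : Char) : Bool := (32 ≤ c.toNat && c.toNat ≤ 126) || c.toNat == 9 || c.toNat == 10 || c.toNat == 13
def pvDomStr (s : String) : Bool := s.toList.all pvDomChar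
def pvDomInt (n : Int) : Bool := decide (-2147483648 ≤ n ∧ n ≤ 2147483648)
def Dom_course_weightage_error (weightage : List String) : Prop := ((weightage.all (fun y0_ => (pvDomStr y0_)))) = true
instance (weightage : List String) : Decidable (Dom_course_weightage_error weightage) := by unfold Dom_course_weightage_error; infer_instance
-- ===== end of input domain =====

-- B fuses A's two passes (digit-flag scan, then summing loop) into one short-circuiting pass with an accumulator: simpler, same cost.
-- ===== PORT A =====
-- first pass: flag1 loop with break (False on first non-digit)
def aFlag : List String → Bool
  | [] => true
  | w :: rest => if PySem.Str.strIsdigit w = false then false else aFlag rest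

-- second pass: sum += int(weight); int() cannot fail here since aFlag guarantees isdigit
def aSum (t : Int) : List String → Int
  | [] => t
  | w :: rest => aSum (t + (PySem.Int.ofStr? w).getD 0) rest

def course_weightage_error (weightage : List String) : Bool :=
  let flag1 := aFlag weightage
  if flag1 = false then true
  else decide (aSum 0 weightage ≠ 100)

-- ===== PORT B =====
-- single pass: return True on first non-digit, otherwise accumulate the sum
def bGo (total : Int) : List String → Bool
  | [] => decide (total ≠ 100)
  | w :: rest => if PySem.Str.strIsdigit w then bGo (total + (PySem.Int.ofStr? w).getD 0) rest else true

def course_weightage_error_alt (weightage : List String) : Bool := bGo 0 weightage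

-- ===== PRECONDITION & SPEC =====
def Spec_course_weightage_error (weightage : List String) (out : Bool) : Prop := out = course_weightage_error_alt weightage
instance (weightage : List String) (out : Bool) : Decidable (Spec_course_weightage_error weightage out) := by unfold Spec_course_weightage_error; infer_instance

-- ===== CLAIM (what is proved, stated in full; the proofs are below) =====
def Claim_equal_course_weightage_error : Prop := ∀ (weightage : List String), Dom_course_weightage_error weightage → Spec_course_weightage_error weightage (course_weightage_error weightage)

-- ===== LEMMAS AND PROOFS =====

-- ===== VERDICT (by name: the statement is the Claim_ definition above) =====
theorem bGo_eq (ws : List String) : ∀ (t : Int),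
    bGo t ws = if aFlag ws = false then true else decide (aSum t ws ≠ 100) := by
  induction ws with
  | nil => intro t; simp [bGo, aFlag, aSum]
  | cons w rest ih =>
    intro t
    by_cases h : PySem.Str.strIsdigit w <;> simp [bGo, aFlag, aSum, h, ih, Bool.or_assoc]

theorem course_weightage_error_spec : Claim_equal_course_weightage_error := by
  intro ws _
  unfold Spec_course_weightage_error course_weightage_error course_weightage_error_alt
  rw [bGo_eq]
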